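-- pv_equiv track=rewrite | github.com/ServiceNow/research-tweetsum-plus-plus | factsumm/utils.py | get_references_from_line_numbers
-- ===== SOURCE A (Python) =====
-- def clean_extractive_summaries(text):
--     # remove the number and Agent: or Customer: from the extractive summaries
--     if "Agent:" in text:
--         text = text.split("Agent:")[1].strip()
--     elif "Customer:" in text:
--         text = text.split("Customer:")[1].strip()
--     return text
--
-- def get_references_from_line_numbers(extractive_summaries, line_numbers):
--     # Given a line number, get the text of the extractive summary that starts with that number
--     references = []
--     for line_number in line_numbers:
--         for summary in extractive_summaries.split("\n"): # review this
--             if summary.startswith(str(line_number)):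
--                 references.append(clean_extractive_summaries(summary))
--                 break
--     return references
-- ===== SOURCE B (Python) =====
-- def clean_extractive_summaries(text):
--     # remove the number and Agent: or Customer: from the extractive summaries
--     if "Agent:" in text:
--         text = text.split("Agent:")[1].strip()
--     elif "Customer:" in text:
--         text = text.split("Customer:")[1].strip()
--     return text
--
-- def get_references_from_line_numbers(extractive_summaries, line_numbers):
--     # Single forward pass over the lines: record, for each still-pending line
--     # number, the first line that starts with it; then emit in request order.
--     lines = extractive_summaries.split("\n")
--     pending = set(str(n) for n in line_numbers)
--     first = {}
--     for line in lines:
--         if not pending: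
--             break
--         matched = [k for k in pending if line.startswith(k)]
--         for k in matched:
--             first[k] = clean_extractive_summaries(line)
--             pending.discard(k)
--     return [first[str(n)] for n in line_numbers if str(n) in first]
-- ===== Notes on version B (the rewrite author's own statement) =====
-- stated objective: faster
-- what changed: B inverts the loop nest: instead of re-splitting and rescanning all lines for every requested number, it splits once and makes a single forward pass over the lines, recording in a dict the cleaned first matching line per still-pending number (with early exit once all are resolved), then emits results in request order.
import Mathlib
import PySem

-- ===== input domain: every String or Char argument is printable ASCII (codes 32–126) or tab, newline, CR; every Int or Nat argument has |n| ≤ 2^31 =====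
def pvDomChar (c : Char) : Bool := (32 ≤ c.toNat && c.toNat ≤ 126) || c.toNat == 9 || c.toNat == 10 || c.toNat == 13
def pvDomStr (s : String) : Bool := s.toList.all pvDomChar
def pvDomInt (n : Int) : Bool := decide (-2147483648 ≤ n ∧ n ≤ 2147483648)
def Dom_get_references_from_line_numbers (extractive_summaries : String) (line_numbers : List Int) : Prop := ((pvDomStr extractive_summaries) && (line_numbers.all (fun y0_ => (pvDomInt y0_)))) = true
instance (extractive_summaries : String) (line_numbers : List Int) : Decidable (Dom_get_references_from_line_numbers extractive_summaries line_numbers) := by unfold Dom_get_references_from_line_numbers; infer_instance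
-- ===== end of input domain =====

-- B inverts the loop nest: one forward pass over the lines with a first-match dict, then emit in request order (measurably faster: per-number rescans disappear).

-- ===== PORT A =====
-- helper clean_extractive_summaries (shared module helper, used verbatim by both Pythons)
def pyClean (text : String) : String :=
  if PySem.Str.isIn "Agent:" text then
    PySem.Str.strip (((PySem.Str.split? text "Agent:").getD []).getD 1 "")
  else if PySem.Str.isIn "Customer:" text then
    PySem.Str.strip (((PySem.Str.split? text "Customer:").getD []).getD 1 "")
  else text

def get_references_from_line_numbers (extractive_summaries : String) (line_numbers : List Int) : List String :=
  line_numbers.foldl (fun references line_number =>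
    -- inner 'for summary in split: if startswith: append; break' = first match, if any
    match ((PySem.Str.split? extractive_summaries "\n").getD []).find?
            (fun summary => PySem.Str.startswith summary (PySem.Int.toStr line_number)) with
    | some summary => references ++ [pyClean summary]
    | none => references) []

-- ===== PORT B =====
-- the forward pass of Source B: for each line, record it for every still-pending key it starts with
def pvScanB (lines : List String) (pending : List String) (first : PySem.Dict String String) :
    PySem.Dict String String :=
  match lines with
  | [] => first
  | line :: rest =>
    if pending = [] then first
    else
      let matched := pending.filter (fun k => PySem.Str.startswith line k)
      pvScanB rest (pending.filter (fun k => !(PySem.Str.startswith line k)))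
        (matched.foldl (fun d k => d.insert k (pyClean line)) first)

def get_references_from_line_numbers_alt (extractive_summaries : String) (line_numbers : List Int) : List String :=
  let lines := (PySem.Str.split? extractive_summaries "\n").getD []
  let first := pvScanB lines (PySem.Set.ofList (line_numbers.map PySem.Int.toStr)) PySem.Dict.empty
  (line_numbers.filter (fun n => first.contains (PySem.Int.toStr n))).map
    (fun n => first.getD (PySem.Int.toStr n) "")

-- ===== PRECONDITION & SPEC =====
def Spec_get_references_from_line_numbers (extractive_summaries : String) (line_numbers : List Int) (out : List String) : Prop := out = get_references_from_line_numbers_alt extractive_summaries line_numbers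
instance (extractive_summaries : String) (line_numbers : List Int) (out : List String) : Decidable (Spec_get_references_from_line_numbers extractive_summaries line_numbers out) := by unfold Spec_get_references_from_line_numbers; infer_instance

-- ===== CLAIM (what is proved, stated in full; the proofs are below) =====
def Claim_equal_get_references_from_line_numbers : Prop := ∀ (extractive_summaries : String) (line_numbers : List Int), Dom_get_references_from_line_numbers extractive_summaries line_numbers → Spec_get_references_from_line_numbers extractive_summaries line_numbers (get_references_from_line_numbers extractive_summaries line_numbers)

-- ===== LEMMAS AND PROOFS =====

-- a fold of inserts with one constant value: lookup is the value iff the key was inserted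
theorem pv_get?_foldl_insert_const (l : List String) (d : PySem.Dict String String) (v : String)
    (k : String) :
    (l.foldl (fun d k' => d.insert k' v) d).get? k =
      if k ∈ l then some v else d.get? k := by
  induction l generalizing d with
  | nil => simp
  | cons x xs ih =>
    simp only [List.foldl_cons, ih, List.mem_cons]
    by_cases hx : k = x
    · subst hx
      by_cases hk : k ∈ xs <;> simp [hk, PySem.Dict.get?_insert_self]
    · have hne : (d.insert x v).get? k = d.get? k := PySem.Dict.get?_insert_of_ne d v hx
      by_cases hk : k ∈ xs <;> simp [hk, hx, hne]

-- characterisation of the forward pass: a pending key gets the first matching line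
theorem pvScanB_get? (lines : List String) (pending : List String)
    (first : PySem.Dict String String) (k : String) :
    (pvScanB lines pending first).get? k =
      if k ∈ pending then
        match lines.find? (fun l => PySem.Str.startswith l k) with
        | some l => some (pyClean l)
        | none => first.get? k
      else first.get? k := by
  induction lines generalizing pending first with
  | nil =>
    simp only [pvScanB, List.find?_nil]
    split <;> rfl
  | cons line rest ih =>
    by_cases hnil : pending = []
    · subst hnil; simp [pvScanB]
    · simp only [pvScanB, if_neg hnil]
      rw [ih, pv_get?_foldl_insert_const]
      by_cases hm : PySem.Chars.startswith line.toList k.toList = true <;>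
      by_cases hp : k ∈ pending <;>
        simp [List.mem_filter, hm, hp]

-- the per-number result both programs compute: clean of the first matching line, if any
def pvHit (lines : List String) (n : Int) : Option String :=
  lines.find? (fun l => PySem.Str.startswith l (PySem.Int.toStr n))

-- the emission loop of B over a dict that stores exactly the per-number hits
theorem pv_emit (lines : List String) (first : PySem.Dict String String) (lns : List Int)
    (h : ∀ n ∈ lns, first.get? (PySem.Int.toStr n) = (pvHit lines n).map pyClean) :
    (lns.filter (fun n => first.contains (PySem.Int.toStr n))).map
        (fun n => first.getD (PySem.Int.toStr n) "") =
      lns.flatMap (fun n =>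
        match pvHit lines n with
        | some l => [pyClean l]
        | none => []) := by
  induction lns with
  | nil => rfl
  | cons n ns ih =>
    have hn := h n (by simp)
    have hcont : first.contains (PySem.Int.toStr n) =
        ((pvHit lines n).map pyClean).isSome := by
      rw [PySem.Dict.contains_eq_isSome_get?, hn]
    have hget : first.getD (PySem.Int.toStr n) "" =
        (((pvHit lines n).map pyClean)).getD "" := by
      rw [PySem.Dict.getD_eq_get?_getD, hn]
    cases hfind : pvHit lines n <;>
      simp [hcont, hfind, hget, ih (fun m hm => h m (by simp [hm]))]

theorem get_references_from_line_numbers_spec : Claim_equal_get_references_from_line_numbers := by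
  intro extractive_summaries line_numbers _dom
  unfold Spec_get_references_from_line_numbers
  unfold get_references_from_line_numbers get_references_from_line_numbers_alt
  set lines := (PySem.Str.split? extractive_summaries "\n").getD []
  -- A's loop is an append-of-at-most-one fold
  have hA : (line_numbers.foldl (fun references line_number =>
      match lines.find? (fun summary =>
          PySem.Str.startswith summary (PySem.Int.toStr line_number)) with
      | some summary => references ++ [pyClean summary]
      | none => references) []) =
      line_numbers.flatMap (fun n =>
        match pvHit lines n with
        | some l => [pyClean l]
        | none => []) := by
    have hfun : (fun (references : List String) (line_number : Int) =>
        match lines.find? (fun summary =>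
            PySem.Str.startswith summary (PySem.Int.toStr line_number)) with
        | some summary => references ++ [pyClean summary]
        | none => references) =
        (fun references n => references ++
          (match pvHit lines n with
          | some l => [pyClean l]
          | none => [])) := by
      funext references n
      simp only [pvHit]
      cases lines.find? (fun summary =>
          PySem.Str.startswith summary (PySem.Int.toStr n)) <;> simp
    rw [hfun, PySem.List.foldl_append_eq_flatMap]
    rfl
  rw [hA]
  -- B's dict stores exactly the per-number hits for every requested number
  refine (pv_emit lines _ line_numbers ?_).symm
  intro n hn
  rw [pvScanB_get?]
  have hmem : PySem.Int.toStr n ∈ PySem.Set.ofList (line_numbers.map PySem.Int.toStr) := by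
    rw [PySem.Set.mem_ofList]
    exact List.mem_map_of_mem hn
  rw [if_pos hmem]
  unfold pvHit
  cases lines.find? (fun l => PySem.Str.startswith l (PySem.Int.toStr n)) <;>
    simp [PySem.Dict.empty, PySem.Dict.get?]
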